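-- pv_equiv track=rewrite | github.com/tobiasGuta/MonitorTool | fping.py | checksum
-- ===== SOURCE A (Python) =====
-- def checksum(source_string):
--     sum = 0
--     count_to = (len(source_string) // 2) * 2
--     count = 0
--
--     while count < count_to:
--         this_val = source_string[count + 1] * 256 + source_string[count]
--         sum = sum + this_val
--         sum = sum & 0xFFFFFFFF
--         count += 2
--
--     if count_to < len(source_string):
--         sum = sum + source_string[-1]
--         sum = sum & 0xFFFFFFFF
--
--     sum = (sum >> 16) + (sum & 0xFFFF)
--     sum = sum + (sum >> 16)
--     answer = ~sum
--     answer = answer & 0xFFFF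
--     answer = answer >> 8 | (answer << 8 & 0xFF00)
--     return answer
-- ===== SOURCE B (Python) =====
-- def checksum(source_string):
--     # Two strided passes: low bytes sit at even indices (including a trailing odd
--     # byte), high bytes at odd indices; one 32-bit mask replaces per-step masking.
--     total = (sum(source_string[0::2]) + 256 * sum(source_string[1::2])) & 0xFFFFFFFF
--     total = (total >> 16) + (total & 0xFFFF)
--     total += total >> 16
--     answer = ~total & 0xFFFF
--     return answer >> 8 | (answer << 8 & 0xFF00)
-- ===== Notes on version B (the rewrite author's own statement) =====
-- stated objective: simpler
-- what changed: Replaces the index-based while loop that masks after every word with two strided slice sums (low bytes at even indices, high bytes at odd indices scaled by 256) masked once, since addition mod 2^32 commutes with the mask; the carry fold, complement and byte swap are unchanged.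
import Mathlib
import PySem

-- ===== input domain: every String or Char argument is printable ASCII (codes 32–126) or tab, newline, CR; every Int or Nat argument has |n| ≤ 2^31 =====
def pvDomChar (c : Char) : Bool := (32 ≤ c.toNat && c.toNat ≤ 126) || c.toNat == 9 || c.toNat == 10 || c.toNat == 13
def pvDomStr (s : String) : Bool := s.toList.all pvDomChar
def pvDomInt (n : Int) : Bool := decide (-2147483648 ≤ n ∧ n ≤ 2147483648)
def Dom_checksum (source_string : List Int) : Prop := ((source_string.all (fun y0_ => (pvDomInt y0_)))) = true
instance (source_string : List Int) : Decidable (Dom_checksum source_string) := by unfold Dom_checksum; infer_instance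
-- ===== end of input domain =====

-- B replaces A's index-based, mask-every-step word loop by two strided slice sums masked once (simpler); return values only, no side effects.

-- ===== PORT A =====
-- while loop over count = 0, 2, ..., count_to-2 ported as a fold over range(0, count_to, 2);
-- indices are always in range there, so xs[i] is ported as pyGetD (default never used).
def checksum (source_string : List Int) : Int :=
  let count_to : Int := PySem.Int.floordiv (source_string.length : Int) 2 * 2
  let sum0 : Int :=
    (PySem.List.pyRange 0 count_to 2).foldl
      (fun sum count =>
        PySem.Int.band
          (sum + (PySem.List.pyGetD source_string (count + 1) 0 * 256 +
                  PySem.List.pyGetD source_string count 0)) 4294967295)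
      0
  let sum1 : Int :=
    if count_to < (source_string.length : Int) then
      PySem.Int.band (sum0 + PySem.List.pyGetD source_string (-1) 0) 4294967295
    else sum0
  let sum2 : Int := (sum1 >>> (16 : Nat)) + PySem.Int.band sum1 65535
  let sum3 : Int := sum2 + (sum2 >>> (16 : Nat))
  let answer : Int := PySem.Int.band (Int.not sum3) 65535
  PySem.Int.bor (answer >>> (8 : Nat)) (PySem.Int.band (answer <<< (8 : Nat)) 65280)

-- ===== PORT B =====
-- source_string[0::2] / [1::2] are slice? with step 2 (step ≠ 0, so never none; getD [] only discharges the Option).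
def checksum_alt (source_string : List Int) : Int :=
  let evens : List Int := (PySem.List.slice? source_string (some 0) none 2).getD []
  let odds : List Int := (PySem.List.slice? source_string (some 1) none 2).getD []
  let total0 : Int := PySem.Int.band (evens.sum + 256 * odds.sum) 4294967295
  let total1 : Int := (total0 >>> (16 : Nat)) + PySem.Int.band total0 65535
  let total2 : Int := total1 + (total1 >>> (16 : Nat))
  let answer : Int := PySem.Int.band (Int.not total2) 65535
  PySem.Int.bor (answer >>> (8 : Nat)) (PySem.Int.band (answer <<< (8 : Nat)) 65280)

-- ===== PRECONDITION & SPEC =====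
def Spec_checksum (source_string : List Int) (out : Int) : Prop := out = checksum_alt source_string
instance (source_string : List Int) (out : Int) : Decidable (Spec_checksum source_string out) := by unfold Spec_checksum; infer_instance

-- ===== CLAIM (what is proved, stated in full; the proofs are below) =====
def Claim_equal_checksum : Prop := ∀ (source_string : List Int), Dom_checksum source_string → Spec_checksum source_string (checksum source_string)

-- ===== LEMMAS AND PROOFS =====

-- Python's  x & 0xFFFFFFFF  is reduction mod 2^32, for every integer x.
theorem band_mask32 (x : Int) : PySem.Int.band x 4294967295 = x % 4294967296 := by
  rcases le_or_gt 0 x with hx | hx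
  · rw [PySem.Int.band_of_nonneg hx (by norm_num)]
    have h : x.toNat &&& (4294967295 : Int).toNat = x.toNat % 2 ^ 32 := by
      have := Nat.and_two_pow_sub_one_eq_mod x.toNat 32
      norm_num at this ⊢
      exact this
    rw [h]
    omega
  · simp only [PySem.Int.band, if_neg (not_le.mpr hx), if_pos (by norm_num : (0:Int) ≤ 4294967295)]
    have h : (4294967295 : Int).toNat &&& (-x - 1).toNat = (-x - 1).toNat % 2 ^ 32 := by
      have := Nat.and_two_pow_sub_one_eq_mod (-x - 1).toNat 32
      rw [Nat.and_comm] at this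
      norm_num at this ⊢
      exact this
    rw [h]
    omega

-- A's loop body masks after every addition; folding it equals summing first and masking once.
theorem foldl_sum_mod (l : List Int) (f : Int → Int) :
    ∀ i : Int, l.foldl (fun s c => (s + f c) % 4294967296) (i % 4294967296)
      = (i + (l.map f).sum) % 4294967296 := by
  induction l with
  | nil => intro i; simp
  | cons c l ih =>
    intro i
    simp only [List.foldl_cons, List.map_cons, List.sum_cons]
    rw [Int.emod_add_emod, ih (i + f c)]
    ring_nf

-- the even-index and odd-index sublists, structurally
def evList : List Int → List Int
  | [] => []
  | [a] => [a]
  | a :: _ :: t => a :: evList t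

def odList : List Int → List Int
  | [] => []
  | [_] => []
  | _ :: b :: t => b :: odList t

-- the sum A's complete-pair loop accumulates (unmasked)
def pairSum : List Int → Int
  | [] => 0
  | [_] => 0
  | a :: b :: t => (b * 256 + a) + pairSum t

theorem ev_aux : ∀ xs : List Int,
    (List.range ((xs.length + 1) / 2)).filterMap (fun k => xs[2 * k]?) = evList xs
  | [] => rfl
  | [a] => by simp [evList]
  | a :: b :: t => by
    have ih := ev_aux t
    have hl : (a :: b :: t).length + 1 = (t.length + 1) + 2 := by simp
    rw [hl]
    have h2 : ((t.length + 1) + 2) / 2 = (t.length + 1) / 2 + 1 := by omega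
    rw [h2, List.range_succ_eq_map, List.filterMap_cons]
    simp only [List.filterMap_map]
    have h3 : (fun k => (a :: b :: t)[2 * (k + 1)]?) = (fun k : Nat => t[2 * k]?) := by
      funext k
      have h4 : 2 * (k + 1) = 2 * k + 1 + 1 := by ring
      simp [h4]
    simp [h3, ih, evList]

theorem slice0_eq (xs : List Int) :
    (PySem.List.slice? xs (some 0) none 2).getD [] = evList xs := by
  simp only [PySem.List.slice?, PySem.List.sliceIndices]
  norm_num
  have hc : (if 0 < xs.length then (((xs.length:Int) + 2 - 1) / 2).toNat else 0) = (xs.length + 1) / 2 := by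
    split <;> omega
  rw [hc, show (fun x : Nat => xs[(2 * (x:Int)).toNat]?) = (fun k : Nat => xs[2 * k]?) from funext fun k => by congr 1]
  exact ev_aux xs

theorem od_aux : ∀ xs : List Int,
    (List.range (xs.length / 2)).filterMap (fun k => xs[2 * k + 1]?) = odList xs
  | [] => rfl
  | [a] => by simp [odList]
  | a :: b :: t => by
    have ih := od_aux t
    have hl : (a :: b :: t).length = t.length + 2 := by simp
    rw [hl]
    have h2 : (t.length + 2) / 2 = t.length / 2 + 1 := by omega
    rw [h2, List.range_succ_eq_map, List.filterMap_cons]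
    simp only [List.filterMap_map]
    have h3 : (fun k => (b :: t)[2 * (k + 1)]?) = (fun k : Nat => t[2 * k + 1]?) := by
      funext k
      have h4 : 2 * (k + 1) = 2 * k + 1 + 1 := by ring
      simp [h4]
    simp [h3, ih, odList]

theorem slice1_eq (xs : List Int) :
    (PySem.List.slice? xs (some 1) none 2).getD [] = odList xs := by
  cases xs with
  | nil => rfl
  | cons a t =>
    simp only [PySem.List.slice?, PySem.List.sliceIndices]
    norm_num
    have hc : (if 0 < t.length then (((t.length:Int) + 2 - 1) / 2).toNat else 0) = (a :: t).length / 2 := by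
      simp only [List.length_cons]; split <;> omega
    rw [hc, show (fun x : Nat => (a :: t)[(1 + 2 * (x:Int)).toNat]?) = (fun k : Nat => (a :: t)[2 * k + 1]?) from funext fun k => by congr 1; omega]
    exact od_aux (a :: t)

theorem pair_aux : ∀ xs : List Int,
    ((List.range (xs.length / 2)).map
      (fun k => xs.getD (2 * k + 1) 0 * 256 + xs.getD (2 * k) 0)).sum = pairSum xs
  | [] => rfl
  | [a] => by simp [pairSum]
  | a :: b :: t => by
    have ih := pair_aux t
    have hl : (a :: b :: t).length = t.length + 2 := by simp
    rw [hl]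
    have h2 : (t.length + 2) / 2 = t.length / 2 + 1 := by omega
    rw [h2, List.range_succ_eq_map, List.map_cons, List.map_map]
    have h3 : ((fun k => (a :: b :: t).getD (2 * k + 1) 0 * 256 + (a :: b :: t).getD (2 * k) 0) ∘ Nat.succ)
        = (fun k => t.getD (2 * k + 1) 0 * 256 + t.getD (2 * k) 0) := by
      funext k
      have e2 : 2 * Nat.succ k = 2 * k + 1 + 1 := by omega
      simp [Function.comp, e2]
    rw [h3, List.sum_cons, ih]
    show (a :: b :: t).getD (2 * 0 + 1) 0 * 256 + (a :: b :: t).getD (2 * 0) 0 + pairSum t = pairSum (a :: b :: t)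
    norm_num [pairSum]

theorem pyRange_sum_eq_pairSum (xs : List Int) :
    ((PySem.List.pyRange 0 (PySem.Int.floordiv (xs.length : Int) 2 * 2) 2).map
      (fun c => PySem.List.pyGetD xs (c + 1) 0 * 256 + PySem.List.pyGetD xs c 0)).sum
      = pairSum xs := by
  rw [PySem.Int.floordiv_eq_ediv_of_pos (by norm_num), PySem.List.pyRange_of_pos _ _ (by norm_num)]
  have hc : (if (0:Int) < (xs.length:Int) / 2 * 2 then (((xs.length:Int) / 2 * 2 - 0 + 2 - 1) / 2).toNat else 0)
      = xs.length / 2 := by split <;> omega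
  rw [hc, List.map_map]
  have h3 : ((fun c => PySem.List.pyGetD xs (c + 1) 0 * 256 + PySem.List.pyGetD xs c 0) ∘ (fun k : Nat => 0 + 2 * (k:Int)))
      = (fun k : Nat => xs.getD (2 * k + 1) 0 * 256 + xs.getD (2 * k) 0) := by
    funext k
    have e2 : (0 : Int) + 2 * (k:Int) = ((2 * k : Nat) : Int) := by push_cast; ring
    have e3 : ((2 * k : Nat) : Int) + 1 = ((2 * k + 1 : Nat) : Int) := by push_cast; ring
    simp only [Function.comp, e2, e3, PySem.List.pyGetD_natCast]
  rw [h3]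
  exact pair_aux xs

theorem pyGetD_neg_one (xs : List Int) (h : xs ≠ []) :
    PySem.List.pyGetD xs (-1) 0 = xs.getLastD 0 := by
  have hlen : 0 < xs.length := List.length_pos_iff.mpr h
  simp only [PySem.List.pyGetD, PySem.List.pyGet?, PySem.List.pyIdx?]
  rw [if_neg (by omega), if_pos (by omega)]
  simp only [Option.bind_some]
  rw [show xs.length - (-(-1:Int)).toNat = xs.length - 1 by omega]
  rw [← List.getLast?_eq_getElem?]
  cases xs with
  | nil => simp at hlen
  | cons a t => simp [List.getLastD_eq_getLast?]

theorem pair_split : ∀ xs : List Int,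
    pairSum xs + (if xs.length % 2 = 1 then PySem.List.pyGetD xs (-1) 0 else 0)
      = (evList xs).sum + 256 * (odList xs).sum
  | [] => by simp [pairSum, evList, odList]
  | [a] => by simp [pairSum, evList, odList, pyGetD_neg_one]
  | a :: b :: t => by
    have ih := pair_split t
    have hl : (a :: b :: t).length % 2 = t.length % 2 := by simp; omega
    rw [hl]
    by_cases hp : t.length % 2 = 1
    · have ht : t ≠ [] := by intro h; rw [h] at hp; simp at hp
      rw [if_pos hp] at ih ⊢
      rw [show PySem.List.pyGetD (a :: b :: t) (-1) 0 = PySem.List.pyGetD t (-1) 0 by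
        rw [pyGetD_neg_one _ (by simp), pyGetD_neg_one _ ht]
        cases t with
        | nil => exact absurd rfl ht
        | cons c u => simp]
      show (b * 256 + a) + pairSum t + PySem.List.pyGetD t (-1) 0
          = (a :: evList t).sum + 256 * (b :: odList t).sum
      simp only [List.sum_cons]
      omega
    · rw [if_neg hp] at ih ⊢
      show (b * 256 + a) + pairSum t + 0 = (a :: evList t).sum + 256 * (b :: odList t).sum
      simp only [List.sum_cons]
      omega

-- ===== VERDICT (by name: the statement is the Claim_ definition above) =====
theorem checksum_spec : Claim_equal_checksum := by
  intro xs _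
  unfold Spec_checksum checksum checksum_alt
  dsimp only
  have hfold : (PySem.List.pyRange 0 (PySem.Int.floordiv (xs.length : Int) 2 * 2) 2).foldl
      (fun sum count =>
        PySem.Int.band
          (sum + (PySem.List.pyGetD xs (count + 1) 0 * 256 + PySem.List.pyGetD xs count 0)) 4294967295)
      0 = pairSum xs % 4294967296 := by
    simp only [band_mask32]
    have h := foldl_sum_mod (PySem.List.pyRange 0 (PySem.Int.floordiv (xs.length : Int) 2 * 2) 2)
      (fun c => PySem.List.pyGetD xs (c + 1) 0 * 256 + PySem.List.pyGetD xs c 0) 0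
    rw [show (0:Int) % 4294967296 = 0 from rfl, zero_add] at h
    rw [h, pyRange_sum_eq_pairSum]
  have hcond : (PySem.Int.floordiv (xs.length : Int) 2 * 2 < (xs.length : Int)) ↔ xs.length % 2 = 1 := by
    rw [PySem.Int.floordiv_eq_ediv_of_pos (by norm_num)]
    omega
  have key : (if PySem.Int.floordiv (xs.length : Int) 2 * 2 < (xs.length : Int) then
        PySem.Int.band
          ((PySem.List.pyRange 0 (PySem.Int.floordiv (xs.length : Int) 2 * 2) 2).foldl
            (fun sum count =>
              PySem.Int.band
                (sum + (PySem.List.pyGetD xs (count + 1) 0 * 256 + PySem.List.pyGetD xs count 0)) 4294967295)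
            0 + PySem.List.pyGetD xs (-1) 0) 4294967295
      else
        (PySem.List.pyRange 0 (PySem.Int.floordiv (xs.length : Int) 2 * 2) 2).foldl
          (fun sum count =>
            PySem.Int.band
              (sum + (PySem.List.pyGetD xs (count + 1) 0 * 256 + PySem.List.pyGetD xs count 0)) 4294967295)
          0)
      = PySem.Int.band
          (((PySem.List.slice? xs (some 0) none 2).getD []).sum +
            256 * ((PySem.List.slice? xs (some 1) none 2).getD []).sum) 4294967295 := by
    rw [slice0_eq, slice1_eq, band_mask32, ← pair_split]
    by_cases hp : xs.length % 2 = 1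
    · rw [if_pos (hcond.mpr hp), if_pos hp, band_mask32, hfold, Int.emod_add_emod]
    · rw [if_neg (fun hlt => hp (hcond.mp hlt)), if_neg hp, hfold, add_zero, band_mask32]
  rw [key]
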